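-- pv_equiv track=rewrite | github.com/parachutel/cs221 | hw1/foundations/submission.py | find_singleton_words
-- ===== SOURCE A (Python) =====
-- from typing import Any, DefaultDict, List, Set, Tuple
--
-- def find_singleton_words(text: str) -> Set[str]:
--     """
--     Split the string |text| by whitespace and return the set of words that
--     occur exactly once.
--     You might find it useful to use collections.defaultdict(int).
--     """
--     # BEGIN_YOUR_CODE (our solution is 4 lines of code, but don't worry if you deviate from this)
--     words = text.split(' ')
--     counter = {}
--     for word in words:
--         if word in counter.keys():
--             counter[word] += 1
--         else:
--             counter[word] = 1
--     unique_words = []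
--     for k in counter.keys():
--         if counter[k] == 1:
--             unique_words.append(k)
--     return set(unique_words)
-- ===== SOURCE B (Python) =====
-- def find_singleton_words(text: str):
--     """Single pass with two classification sets; no counting dict, no second filter pass."""
--     seen_once = set()
--     seen_multiple = set()
--     for word in text.split(' '):
--         if word in seen_multiple:
--             continue
--         if word in seen_once:
--             seen_once.discard(word)
--             seen_multiple.add(word)
--         else:
--             seen_once.add(word)
--     return seen_once
-- ===== Notes on version B (the rewrite author's own statement) =====
-- stated objective: alternative
-- what changed: Replaces the integer-count dict plus a second filtering pass over the keys with a single pass maintaining two classification sets (seen_once / seen_multiple), returning seen_once directly.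
import Mathlib
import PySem

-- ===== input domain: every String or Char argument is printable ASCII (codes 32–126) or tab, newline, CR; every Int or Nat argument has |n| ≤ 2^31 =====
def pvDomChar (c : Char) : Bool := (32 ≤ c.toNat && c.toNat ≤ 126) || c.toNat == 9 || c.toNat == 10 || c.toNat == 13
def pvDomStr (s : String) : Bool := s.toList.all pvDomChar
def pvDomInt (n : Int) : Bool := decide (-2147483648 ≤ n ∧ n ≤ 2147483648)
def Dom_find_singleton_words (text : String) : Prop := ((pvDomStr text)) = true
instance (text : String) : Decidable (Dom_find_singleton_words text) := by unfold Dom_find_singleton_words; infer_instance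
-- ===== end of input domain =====

-- B replaces A's counting dict plus a second filtering pass by a single pass keeping two
-- classification sets (seen_once / seen_multiple); alternative decomposition, same cost.

-- text.split(' ') (both Pythons start with it); exact via PySem.Chars.splitOn (sep ≠ "")
def pvSplitSp (text : String) : List String :=
  (PySem.Chars.splitOn text.toList [' ']).map String.ofList

-- ===== PORT A =====
def find_singleton_words (text : String) : List String :=
  let words := pvSplitSp text
  let counter := words.foldl
    (fun d word => if d.contains word then d.insert word (d.getD word 0 + 1)
                   else d.insert word 1)
    (PySem.Dict.empty : PySem.Dict String Int)
  let unique_words := counter.keys.foldl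
    (fun acc k => if counter.getD k 0 == 1 then acc ++ [k] else acc) ([] : List String)
  PySem.Set.ofList unique_words

-- ===== PORT B =====
def fswStep (st : PySem.Set String × PySem.Set String) (word : String) :
    PySem.Set String × PySem.Set String :=
  if st.2.contains word then st
  else if st.1.contains word then (st.1.discard word, st.2.add word)
  else (st.1.add word, st.2)

def find_singleton_words_alt (text : String) : List String :=
  ((pvSplitSp text).foldl fswStep (PySem.Set.empty, PySem.Set.empty)).1

-- ===== PRECONDITION & SPEC =====
def Spec_find_singleton_words (text : String) (out : List String) : Prop := out = find_singleton_words_alt text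
instance (text : String) (out : List String) : Decidable (Spec_find_singleton_words text out) := by unfold Spec_find_singleton_words; infer_instance

-- ===== CLAIM (what is proved, stated in full; the proofs are below) =====
def Claim_equal_find_singleton_words : Prop := ∀ (text : String), Dom_find_singleton_words text → Spec_find_singleton_words text (find_singleton_words text)

-- ===== LEMMAS AND PROOFS =====

-- "word occurs exactly once": the predicate both programs compute
def fswPred (ws : List String) (k : String) : Bool := ws.count k == 1

-- A returns the first occurrences (set of words) filtered to count 1
theorem find_singleton_words_char (text : String) :
    find_singleton_words text =
      (PySem.Set.ofList (pvSplitSp text)).filter (fswPred (pvSplitSp text)) := by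
  unfold find_singleton_words
  set ws := pvSplitSp text with hws
  have hstep : (fun (d : PySem.Dict String Int) word =>
      if d.contains word then d.insert word (d.getD word 0 + 1) else d.insert word 1)
      = fun d word => d.insert word (d.getD word 0 + 1) := by
    funext d w
    by_cases h : d.contains w = true
    · simp [h]
    · simp [h, PySem.Dict.getD_of_not_contains d (0 : Int) (Bool.eq_false_iff.mpr h)]
  simp only [hstep, PySem.Dict.foldl_insert_getD_add_one_eq_counter]
  rw [PySem.List.foldl_append_if_eq_filter, List.nil_append]
  rw [PySem.Dict.keys_counter]
  rw [List.filter_congr (fun k _ => ?_)]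
  · exact PySem.Set.ofList_eq_self_of_nodup _ ((PySem.Set.nodup_ofList ws).filter _)
  · show ((PySem.Dict.counter ws).getD k 0 == 1) = fswPred ws k
    rw [PySem.Dict.getD_counter]
    rcases eq_or_ne (ws.count k) 1 with h | h <;> simp [fswPred, h]

-- B's loop invariant: seen_once is exactly A's characterisation (same list, same order);
-- seen_multiple holds (as a set) the words seen with count ≠ 1
theorem fsw_loop (ws : List String) :
    (ws.foldl fswStep (PySem.Set.empty, PySem.Set.empty)).1
        = (PySem.Set.ofList ws).filter (fswPred ws)
    ∧ ∀ k, k ∈ (ws.foldl fswStep (PySem.Set.empty, PySem.Set.empty)).2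
        ↔ k ∈ ws ∧ ¬ fswPred ws k = true := by
  induction ws using List.reverseRecOn with
  | nil => simp [PySem.Set.empty, PySem.Set.ofList]
  | append_singleton xs w ih =>
    obtain ⟨h1, h2⟩ := ih
    rw [List.foldl_append] at *
    set st := xs.foldl fswStep (PySem.Set.empty, PySem.Set.empty) with hst
    simp only [List.foldl_cons, List.foldl_nil]
    have hcount : ∀ k, (xs ++ [w]).count k = xs.count k + (if w == k then 1 else 0) := by
      intro k; simp [List.count_append, List.count_singleton]
    have hpred_ne : ∀ k, w ≠ k → fswPred (xs ++ [w]) k = fswPred xs k := by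
      intro k hk; simp [fswPred, hcount, hk]
    unfold fswStep
    by_cases hm : st.2.contains w = true
    · -- w already classified 'multiple': state unchanged
      have hw := (h2 w).mp (PySem.Set.contains_iff _ _ |>.mp hm)
      have hcnt2 : xs.count w ≠ 1 := by simpa [fswPred] using hw.2
      have hcnt0 : xs.count w ≠ 0 := fun h => (List.count_eq_zero.mp h) hw.1
      rw [if_pos hm]
      constructor
      · rw [h1, PySem.Set.ofList_append_singleton, PySem.Set.add,
            if_pos (PySem.Set.contains_iff _ _ |>.mpr ((PySem.Set.mem_ofList _ _).mpr hw.1))]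
        refine (List.filter_congr (fun k _ => ?_)).symm
        by_cases hk : w = k
        · subst hk; simp [fswPred, hcount, hcnt2, hcnt0]
        · exact hpred_ne k hk
      · intro k
        rw [h2 k]
        by_cases hk : w = k
        · subst hk
          simp [hw.1, hcnt2, hcnt0, fswPred, hcount]
        · simp only [hpred_ne k hk, List.mem_append, List.mem_singleton]
          have : ¬ k = w := fun h => hk h.symm
          tauto
    · by_cases ho : st.1.contains w = true
      · -- second occurrence of w: moves from seen_once to seen_multiple
        have hw1 : w ∈ st.1 := PySem.Set.contains_iff _ _ |>.mp ho
        have hwx : w ∈ xs := by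
          rw [h1] at hw1
          exact (PySem.Set.mem_ofList _ _).mp (List.mem_of_mem_filter hw1)
        have hcnt1 : xs.count w = 1 := by
          rw [h1] at hw1
          simpa [fswPred] using List.of_mem_filter hw1
        have hwm : w ∉ st.2 := fun h => hm ((PySem.Set.contains_iff _ _).mpr h)
        rw [if_neg hm, if_pos ho]
        constructor
        · show st.1.discard w = _
          rw [h1, PySem.Set.ofList_append_singleton, PySem.Set.add,
              if_pos (PySem.Set.contains_iff _ _ |>.mpr ((PySem.Set.mem_ofList _ _).mpr hwx))]
          rw [PySem.Set.discard, List.filter_filter]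
          refine (List.filter_congr (fun k _ => ?_)).symm
          by_cases hk : w = k
          · subst hk; simp [fswPred, hcount, hcnt1]
          · have hkw : ¬ k = w := fun h => hk h.symm
            simp [hpred_ne k hk, hkw]
        · intro k
          show k ∈ st.2.add w ↔ _
          rw [PySem.Set.mem_add]
          by_cases hk : w = k
          · subst hk
            simp [fswPred, hcount, hcnt1, hwm]
          · have hkw : ¬ k = w := fun h => hk h.symm
            simp only [h2 k, hpred_ne k hk, List.mem_append, List.mem_singleton]
            tauto
      · -- first occurrence of w: appended to seen_once
        have hw1 : w ∉ st.1 := fun h => ho ((PySem.Set.contains_iff _ _).mpr h)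
        have hwm : w ∉ st.2 := fun h => hm ((PySem.Set.contains_iff _ _).mpr h)
        have hwx : w ∉ xs := by
          intro hx
          by_cases hc : xs.count w = 1
          · refine hw1 ?_
            rw [h1]
            exact List.mem_filter.mpr ⟨(PySem.Set.mem_ofList _ _).mpr hx, by simp [fswPred, hc]⟩
          · exact hwm ((h2 w).mpr ⟨hx, by simp [fswPred, hc]⟩)
        have hcnt0 : xs.count w = 0 := List.count_eq_zero.mpr hwx
        rw [if_neg hm, if_neg ho]
        constructor
        · show st.1.add w = _
          rw [PySem.Set.ofList_append_singleton, PySem.Set.add, PySem.Set.add,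
              if_neg ho, if_neg (fun h : (PySem.Set.ofList xs).contains w = true =>
                hwx ((PySem.Set.mem_ofList _ _).mp ((PySem.Set.contains_iff _ _).mp h)))]
          rw [List.filter_append]
          have hw_single : List.filter (fswPred (xs ++ [w])) [w] = [w] := by
            simp [fswPred, hcount, hcnt0]
          rw [hw_single, h1]
          congr 1
          refine (List.filter_congr (fun k hk => ?_)).symm
          have : w ≠ k := fun h => hwx (h ▸ (PySem.Set.mem_ofList _ _).mp hk)
          exact hpred_ne k this
        · intro k
          show k ∈ st.2 ↔ _
          by_cases hk : w = k
          · subst hk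
            simp [hwm, fswPred, hcount, hcnt0]
          · have hkw : ¬ k = w := fun h => hk h.symm
            simp only [h2 k, hpred_ne k hk, List.mem_append, List.mem_singleton]
            tauto

-- ===== VERDICT (by name: the statement is the Claim_ definition above) =====
theorem find_singleton_words_spec : Claim_equal_find_singleton_words := by
  intro text _
  unfold Spec_find_singleton_words find_singleton_words_alt
  rw [find_singleton_words_char, (fsw_loop (pvSplitSp text)).1]
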